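-- pv_equiv track=rewrite | github.com/nvanslyke/wordle-solver | wordle.py | alltwos
-- ===== SOURCE A (Python) =====
-- def alltwos(narrowed):
--     count = 0
--     for word in narrowed:
--         for char in word:
--             if word.count(char) > 1:
--                 count += 1
--                 break
--     if count == len(narrowed):
--         return True
--     else:
--         return False
-- ===== SOURCE B (Python) =====
-- def alltwos(narrowed):
--     return all(len(set(word)) < len(word) for word in narrowed)
-- ===== Notes on version B (the rewrite author's own statement) =====
-- stated objective: faster
-- what changed: Replaces the counter-plus-inner-scan (per-character word.count with break, then comparing the counter to len(narrowed)) with a single all(...) over the words that detects a repeat by a deduplicating set being shorter than the word.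
import Mathlib
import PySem

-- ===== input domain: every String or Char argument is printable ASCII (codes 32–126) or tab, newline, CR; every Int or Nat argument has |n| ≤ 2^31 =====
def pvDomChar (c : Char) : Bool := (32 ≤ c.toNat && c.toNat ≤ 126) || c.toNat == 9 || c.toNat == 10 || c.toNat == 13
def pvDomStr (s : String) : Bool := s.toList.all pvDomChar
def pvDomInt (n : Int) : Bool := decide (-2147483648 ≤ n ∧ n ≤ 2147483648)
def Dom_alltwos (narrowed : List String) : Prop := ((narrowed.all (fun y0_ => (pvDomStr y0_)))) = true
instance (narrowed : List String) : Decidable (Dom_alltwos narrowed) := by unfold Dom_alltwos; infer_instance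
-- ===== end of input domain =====

-- B replaces A's counter + per-character count-scan with an idiomatic all(...) using a set per word.

-- ===== PORT A =====
-- inner 'for char in word: if word.count(char) > 1: count += 1; break'
-- (word.count(char) on a 1-character substring equals the character count, exact here)
def alltwosInner (wl : List Char) (chars : List Char) (count : Int) : Int :=
  match chars with
  | [] => count
  | c :: rest => if (PySem.List.count wl c : Int) > 1 then count + 1 else alltwosInner wl rest count

def alltwos (narrowed : List String) : Bool :=
  let count := narrowed.foldl (fun cnt word => alltwosInner word.toList word.toList cnt) (0 : Int)
  if count = (narrowed.length : Int) then true else false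

-- ===== PORT B =====
def alltwos_alt (narrowed : List String) : Bool :=
  narrowed.all (fun word => decide ((PySem.Set.ofList word.toList).length < word.toList.length))

-- ===== PRECONDITION & SPEC =====
def Spec_alltwos (narrowed : List String) (out : Bool) : Prop := out = alltwos_alt narrowed
instance (narrowed : List String) (out : Bool) : Decidable (Spec_alltwos narrowed out) := by unfold Spec_alltwos; infer_instance

-- ===== CLAIM (what is proved, stated in full; the proofs are below) =====
def Claim_equal_alltwos : Prop := ∀ (narrowed : List String), Dom_alltwos narrowed → Spec_alltwos narrowed (alltwos narrowed)

-- ===== LEMMAS AND PROOFS =====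

-- the inner loop adds 1 iff some character of the word repeats
theorem alltwosInner_eq (wl chars : List Char) (count : Int) :
    alltwosInner wl chars count =
      if chars.any (fun c => decide ((PySem.List.count wl c : Int) > 1)) then count + 1 else count := by
  induction chars with
  | nil => simp [alltwosInner]
  | cons c rest ih =>
    by_cases h : (PySem.List.count wl c : Int) > 1
    · have h' : 1 < List.count c wl := by simpa [PySem.List.count_eq] using h
      simp [alltwosInner, List.any_cons, h']
    · have h' : ¬ 1 < List.count c wl := by simpa [PySem.List.count_eq] using h
      simp [alltwosInner, List.any_cons, h', ih]

-- a duplicate character exists iff the deduplicated set is strictly shorter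
theorem hasdup_eq_set (l : List Char) :
    (l.any (fun c => decide ((PySem.List.count l c : Int) > 1)))
      = decide ((PySem.Set.ofList l).length < l.length) := by
  rcases Decidable.em l.Nodup with hnd | hnd
  · have h1 : PySem.Set.ofList l = l := PySem.Set.ofList_eq_self_of_nodup l hnd
    have h2 : l.any (fun c => decide ((PySem.List.count l c : Int) > 1)) = false := by
      simp only [List.any_eq_false, decide_eq_true_eq, not_lt, PySem.List.count_eq]
      intro c _
      have := (List.nodup_iff_count_le_one.mp hnd) c
      omega
    have h3 : (decide (l.length < l.length)) = false := by simp
    rw [h2, h1, h3]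
  · -- not nodup: some count > 1, and ofList is a shorter nodup list
    have h2 : l.any (fun c => decide ((PySem.List.count l c : Int) > 1)) = true := by
      rw [List.nodup_iff_count_le_one] at hnd
      rw [not_forall] at hnd
      obtain ⟨c, hc⟩ := hnd
      have hmem : c ∈ l := List.count_pos_iff.mp (by omega)
      refine List.any_eq_true.mpr ⟨c, hmem, ?_⟩
      simp [PySem.List.count_eq]
      omega
    have hlt : (PySem.Set.ofList l).length < l.length := by
      rcases Nat.lt_or_ge (PySem.Set.ofList l).length l.length with h | h
      · exact h
      · exfalso
        have hle := PySem.Set.length_ofList_le (xs := l)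
        have heq : (PySem.Set.ofList l).length = l.length := le_antisymm hle h
        -- same members, both would be nodup ⇒ perm ⇒ l nodup, contradiction
        have hperm : (PySem.Set.ofList l).Perm l.dedup := by
          refine (List.perm_ext_iff_of_nodup (PySem.Set.nodup_ofList l) l.nodup_dedup).mpr ?_
          intro a
          simp [PySem.Set.mem_ofList, List.mem_dedup]
        have hlen : l.dedup.length = l.length := by
          have := hperm.length_eq; omega
        have : l.dedup = l := (List.dedup_sublist l).eq_of_length hlen
        exact hnd (by rw [← this]; exact l.nodup_dedup)
    rw [h2, decide_eq_true hlt]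

-- ===== VERDICT (by name: the statement is the Claim_ definition above) =====
theorem alltwos_spec : Claim_equal_alltwos := by
  intro narrowed _
  unfold Spec_alltwos alltwos alltwos_alt
  have hfold : narrowed.foldl (fun cnt word => alltwosInner word.toList word.toList cnt) (0 : Int)
      = narrowed.foldl (fun cnt word =>
          if decide ((PySem.Set.ofList word.toList).length < word.toList.length) then cnt + 1 else cnt) (0 : Int) := by
    congr 1
    funext cnt word
    rw [alltwosInner_eq, hasdup_eq_set]
  rw [hfold, PySem.List.foldl_if_add_one, zero_add]
  have hiff : ((narrowed.countP (fun word => decide ((PySem.Set.ofList word.toList).length < word.toList.length)) : Int) = (narrowed.length : Int)) ↔ (narrowed.all (fun word => decide ((PySem.Set.ofList word.toList).length < word.toList.length)) = true) := by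
    rw [Int.natCast_inj, List.countP_eq_length, List.all_eq_true]
  cases hb : narrowed.all (fun word => decide ((PySem.Set.ofList word.toList).length < word.toList.length)) with
  | true => rw [if_pos (hiff.mpr hb)]
  | false =>
    have hn : ¬ ((narrowed.countP (fun word => decide ((PySem.Set.ofList word.toList).length < word.toList.length)) : Int) = (narrowed.length : Int)) := by
      intro hx
      have h2 := hiff.mp hx
      rw [hb] at h2
      cases h2
    rw [if_neg hn]
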